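-- pv_equiv track=rewrite | github.com/hkb3711220/Kaggle | Pronoun/BERT+END2END/loader.py | create_segment_id
-- ===== SOURCE A (Python) =====
-- def create_segment_id(tokenized_text):
--
--     segment_num = 0
--     segments_ids = []
--     for i in range(len(tokenized_text)):
--         token = tokenized_text[i]
--         segments_ids.append(segment_num)
--         if token == "[SEP]": segment_num += 1
--
--     return segments_ids
-- ===== SOURCE B (Python) =====
-- def create_segment_id(tokenized_text):
--     indicators = [int(token == "[SEP]") for token in tokenized_text]
--     prefix = [0]
--     for x in indicators:
--         prefix.append(prefix[-1] + x)
--     return prefix[:-1]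
-- ===== Notes on version B (the rewrite author's own statement) =====
-- stated objective: alternative
-- what changed: Replaces the index-loop with a running counter by a map to 0/1 [SEP]-indicators followed by an exclusive prefix sum (inclusive scan, drop the last element).
import Mathlib
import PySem

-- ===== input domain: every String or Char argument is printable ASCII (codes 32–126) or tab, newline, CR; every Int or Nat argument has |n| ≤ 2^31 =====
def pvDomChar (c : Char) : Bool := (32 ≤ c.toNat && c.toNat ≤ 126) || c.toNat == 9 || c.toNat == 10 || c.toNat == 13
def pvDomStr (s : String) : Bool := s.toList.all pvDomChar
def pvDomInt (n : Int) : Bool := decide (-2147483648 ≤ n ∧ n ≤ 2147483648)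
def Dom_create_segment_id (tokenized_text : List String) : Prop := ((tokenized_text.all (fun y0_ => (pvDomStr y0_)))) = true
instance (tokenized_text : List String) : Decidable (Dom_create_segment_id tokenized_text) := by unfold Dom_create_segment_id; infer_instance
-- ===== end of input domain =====

-- B replaces A's counter loop by an indicator map + exclusive prefix sum (alternative decomposition, same cost).


-- ===== PORT A =====
-- for i in range(len(..)): read token, append segment_num, maybe increment
def create_segment_id (tokenized_text : List String) : List Int :=
  let st := (PySem.List.pyRange 0 (tokenized_text.length : Int) 1).foldl
    (fun (st : Int × List Int) i =>
      let token := PySem.List.pyGetD tokenized_text i ""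
      let segments_ids := st.2 ++ [st.1]
      let segment_num := if token == "[SEP]" then st.1 + 1 else st.1
      (segment_num, segments_ids)) ((0 : Int), ([] : List Int))
  st.2

-- ===== PORT B =====
def create_segment_id_alt (tokenized_text : List String) : List Int :=
  let indicators := tokenized_text.map (fun token => if token == "[SEP]" then (1 : Int) else 0)
  let pref := indicators.foldl (fun acc x => acc ++ [acc.getLast! + x]) [(0 : Int)]
  pref.dropLast

-- ===== PRECONDITION & SPEC =====
def Spec_create_segment_id (tokenized_text : List String) (out : List Int) : Prop := out = create_segment_id_alt tokenized_text
instance (tokenized_text : List String) (out : List Int) : Decidable (Spec_create_segment_id tokenized_text out) := by unfold Spec_create_segment_id; infer_instance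

-- ===== CLAIM (what is proved, stated in full; the proofs are below) =====
def Claim_equal_create_segment_id : Prop := ∀ (tokenized_text : List String), Dom_create_segment_id tokenized_text → Spec_create_segment_id tokenized_text (create_segment_id tokenized_text)

-- ===== LEMMAS AND PROOFS =====

-- reference: segment ids from indicator list, starting at n
def pvSeg (n : Int) (l : List Int) : List Int :=
  match l with
  | [] => []
  | x :: xs => n :: pvSeg (n + x) xs

-- the same over tokens (A's view)
def pvSegS (n : Int) (l : List String) : List Int :=
  match l with
  | [] => []
  | t :: ts => n :: pvSegS (if t == "[SEP]" then n + 1 else n) ts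

theorem pvSegS_eq_map (l : List String) : ∀ n : Int,
    pvSegS n l = pvSeg n (l.map (fun token => if token == "[SEP]" then (1 : Int) else 0)) := by
  induction l with
  | nil => intro n; rfl
  | cons t ts ih =>
    intro n
    simp only [List.map_cons, pvSegS, pvSeg, ih]
    by_cases h : t == "[SEP]" <;> simp [h]

theorem pvA_fold (l : List String) : ∀ (n : Int) (acc : List Int),
    (l.foldl (fun (st : Int × List Int) token =>
        (if token == "[SEP]" then st.1 + 1 else st.1, st.2 ++ [st.1])) (n, acc)).2
      = acc ++ pvSegS n l := by
  induction l with
  | nil => intro n acc; simp [pvSegS]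
  | cons t ts ih =>
    intro n acc
    simp only [List.foldl_cons, pvSegS, ih]
    simp

def pvScan (n : Int) (l : List Int) : List Int :=
  match l with
  | [] => []
  | x :: xs => (n + x) :: pvScan (n + x) xs

theorem pvB_fold (l : List Int) : ∀ (acc : List Int) (n : Int), acc.getLast! = n →
    l.foldl (fun acc x => acc ++ [acc.getLast! + x]) acc = acc ++ pvScan n l := by
  induction l with
  | nil => intro acc n _; simp [pvScan]
  | cons x xs ih =>
    intro acc n h
    simp only [List.foldl_cons, pvScan]
    rw [h, ih (acc ++ [n + x]) (n + x)
      (by rw [List.getLast!_eq_getLast?_getD, List.getLast?_append]; simp)]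
    simp

theorem pvScan_dropLast (l : List Int) : ∀ n : Int, (n :: pvScan n l).dropLast = pvSeg n l := by
  induction l with
  | nil => intro n; simp [pvScan, pvSeg]
  | cons x xs ih =>
    intro n
    simp only [pvScan, pvSeg, List.dropLast_cons₂, ih]

-- ===== VERDICT (by name: the statement is the Claim_ definition above) =====
theorem create_segment_id_spec : Claim_equal_create_segment_id := by
  intro l _
  show create_segment_id l = create_segment_id_alt l
  unfold create_segment_id create_segment_id_alt
  rw [PySem.List.foldl_pyRange_zero_pyGetD' l "" (fun (st : Int × List Int) token =>
      (if token == "[SEP]" then st.1 + 1 else st.1, st.2 ++ [st.1])) ((0 : Int), ([] : List Int))]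
  rw [pvA_fold]
  simp only [pvB_fold (l.map (fun token => if token == "[SEP]" then (1 : Int) else 0))
    [(0 : Int)] 0 rfl, pvSegS_eq_map]
  simpa using (pvScan_dropLast (l.map (fun token => if token == "[SEP]" then (1 : Int) else 0)) 0).symm
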